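-- pv_equiv track=rewrite | github.com/gaylordjohnson/karenina | karenina.py | create_histograms
-- ===== SOURCE A (Python) =====
-- def create_histograms(words):
--   word_hist = {}
--   char_hist = {}
--   for word in words:
--     if word in word_hist:
--       word_hist[word] += 1
--     else:
--       word_hist[word] = 1
--
--     for ch in word:
--       if ch in char_hist:
--         char_hist[ch] += 1
--       else:
--         char_hist[ch] = 1
--
--   return word_hist, char_hist
-- ===== SOURCE B (Python) =====
-- def create_histograms(words):
--   word_hist = {}
--   for word in words:
--     word_hist[word] = word_hist.get(word, 0) + 1
--   char_hist = {}
--   for word, count in word_hist.items():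
--     for ch in word:
--       char_hist[ch] = char_hist.get(ch, 0) + count
--   return word_hist, char_hist
-- ===== Notes on version B (the rewrite author's own statement) =====
-- stated objective: faster
-- what changed: B builds the word histogram first in its own pass, then derives the character histogram from the word histogram's items, adding each unique word's frequency once per character occurrence, instead of A's single interleaved loop that re-scans every duplicate word character by character.
import Mathlib
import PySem

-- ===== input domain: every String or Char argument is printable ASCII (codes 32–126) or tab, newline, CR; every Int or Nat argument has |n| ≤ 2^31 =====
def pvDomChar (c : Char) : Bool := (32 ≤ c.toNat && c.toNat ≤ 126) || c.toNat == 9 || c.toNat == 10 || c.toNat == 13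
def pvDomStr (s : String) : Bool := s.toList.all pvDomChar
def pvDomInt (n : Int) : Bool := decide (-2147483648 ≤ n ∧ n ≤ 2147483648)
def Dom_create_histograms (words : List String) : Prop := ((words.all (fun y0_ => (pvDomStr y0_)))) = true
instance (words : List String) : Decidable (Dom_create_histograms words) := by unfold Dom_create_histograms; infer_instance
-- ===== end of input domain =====

-- B derives the character histogram from the word histogram's items (frequency-weighted unique words)
-- instead of A's single interleaved loop over every word instance: an alternative decomposition, same results.

-- ===== PORT A =====
def create_histograms (words : List String) : (List (String × Int)) × (List (String × Int)) :=
  let st := words.foldl (fun (st : PySem.Dict String Int × PySem.Dict String Int) word =>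
    (if st.1.contains word then st.1.modify word 0 (· + 1) else st.1.insert word 1,
     word.toList.foldl (fun d c =>
       if d.contains (String.singleton c) then d.modify (String.singleton c) 0 (· + 1)
       else d.insert (String.singleton c) 1) st.2))
    (PySem.Dict.empty, PySem.Dict.empty)
  (st.1.items, st.2.items)

-- ===== PORT B =====
def create_histograms_alt (words : List String) : (List (String × Int)) × (List (String × Int)) :=
  let word_hist := words.foldl (fun d word => d.insert word (d.getD word 0 + 1)) PySem.Dict.empty
  let char_hist := word_hist.items.foldl (fun d p =>
    p.1.toList.foldl (fun d c =>
      d.insert (String.singleton c) (d.getD (String.singleton c) 0 + p.2)) d)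
    PySem.Dict.empty
  (word_hist.items, char_hist.items)

-- ===== PRECONDITION & SPEC =====
def Spec_create_histograms (words : List String) (out : (List (String × Int)) × (List (String × Int))) : Prop := out = create_histograms_alt words
instance (words : List String) (out : (List (String × Int)) × (List (String × Int))) : Decidable (Spec_create_histograms words out) := by unfold Spec_create_histograms; infer_instance

-- ===== CLAIM (what is proved, stated in full; the proofs are below) =====
def Claim_equal_create_histograms : Prop := ∀ (words : List String), Dom_create_histograms words → Spec_create_histograms words (create_histograms words)

-- ===== LEMMAS AND PROOFS =====

-- the weighted character-bump pass over a list of (word, weight) pairs (the common shape of both char loops)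
def pvPairStep (d : PySem.Dict String Int) (p : String × Int) : PySem.Dict String Int :=
  p.1.toList.foldl (fun d c =>
    d.insert (String.singleton c) (d.getD (String.singleton c) 0 + p.2)) d

-- the stream of one-character strings a list of words contributes
def pvCharStream (l : List String) : List String :=
  l.flatMap (fun w => w.toList.map String.singleton)

-- A's "if k in d: d[k] += 1 else: d[k] = 1" is B's "d[k] = d.get(k, 0) + 1"
theorem pvBumpEq (d : PySem.Dict String Int) (k : String) :
    (if d.contains k then d.modify k 0 (· + 1) else d.insert k 1)
      = d.insert k (d.getD k 0 + 1) := by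
  by_cases h : d.contains k
  · simp [h, PySem.Dict.modify]
  · simp only [Bool.not_eq_true] at h
    rw [PySem.Dict.getD_of_not_contains (h := h)]
    simp [h]

theorem pvFoldlExt {α β : Type} (f g : α → β → α) (l : List β) (a : α)
    (h : ∀ a b, f a b = g a b) : l.foldl f a = l.foldl g a := by
  induction l generalizing a with
  | nil => rfl
  | cons x xs ih => simp [List.foldl_cons, h, ih]

theorem pvInnerGetD (cs : List Char) (n : Int) (d : PySem.Dict String Int) (s : String) :
    (cs.foldl (fun d c =>
        d.insert (String.singleton c) (d.getD (String.singleton c) 0 + n)) d).getD s 0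
      = d.getD s 0 + n * ((cs.map String.singleton).count s : Int) := by
  induction cs generalizing d with
  | nil => simp
  | cons c cs ih =>
    simp only [List.foldl_cons, ih, List.map_cons, List.count_cons]
    rw [PySem.Dict.getD_insert]
    by_cases hs : s = String.singleton c
    · simp [hs]; ring
    · simp [hs, Ne.symm hs]

theorem pvPairFoldGetD (L : List (String × Int)) (d : PySem.Dict String Int) (s : String) :
    (L.foldl pvPairStep d).getD s 0
      = d.getD s 0 + (L.map (fun p => p.2 * ((p.1.toList.map String.singleton).count s : Int))).sum := by
  induction L generalizing d with
  | nil => simp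
  | cons p L ih =>
    simp only [List.foldl_cons, ih, List.map_cons, List.sum_cons, pvPairStep, pvInnerGetD]
    ring

theorem pvPairFoldKeys (L : List (String × Int)) (d : PySem.Dict String Int) :
    (L.foldl pvPairStep d).keys
      = PySem.Set.update d.keys (L.flatMap (fun p => p.1.toList.map String.singleton)) := by
  induction L generalizing d with
  | nil => simp
  | cons p L ih =>
    simp only [List.foldl_cons, ih, List.flatMap_cons, PySem.Set.update_append, pvPairStep]
    rw [PySem.Dict.keys_foldl_insert_key]

theorem pvPairFoldNodup (L : List (String × Int)) (d : PySem.Dict String Int)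
    (h : d.keys.Nodup) : (L.foldl pvPairStep d).keys.Nodup := by
  induction L generalizing d with
  | nil => exact h
  | cons p L ih =>
    exact ih _ (PySem.Dict.nodup_keys_foldl_insert_key _ _ _ _ h)

theorem pvKeysAgree (words : List String) :
    PySem.Set.ofList (pvCharStream words) = PySem.Set.ofList (pvCharStream (PySem.Set.ofList words)) := by
  induction words using List.reverseRecOn with
  | nil => rfl
  | append_singleton ws w ih =>
    rw [PySem.Set.ofList_append_singleton]
    by_cases hw : w ∈ ws
    · rw [PySem.Set.add_of_mem (by exact (PySem.Set.mem_ofList _ _).2 hw), ← ih]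
      unfold pvCharStream
      rw [List.flatMap_append, PySem.Set.ofList_append, PySem.Set.update_eq_append_filter]
      have : ∀ y ∈ PySem.Set.ofList ([w].flatMap (fun w => w.toList.map String.singleton)),
          (PySem.Set.ofList (ws.flatMap (fun w => w.toList.map String.singleton))).contains y = true := by
        intro y hy
        rw [PySem.Set.contains_iff, PySem.Set.mem_ofList _ _]
        rw [PySem.Set.mem_ofList _ _] at hy
        simp only [List.flatMap_cons, List.flatMap_nil, List.append_nil, List.mem_map] at hy
        obtain ⟨c, hc, rfl⟩ := hy
        exact List.mem_flatMap.2 ⟨w, hw, List.mem_map.2 ⟨c, hc, rfl⟩⟩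
      have hfil : List.filter (fun y => !(PySem.Set.contains (PySem.Set.ofList (ws.flatMap (fun w => w.toList.map String.singleton))) y))
          (PySem.Set.ofList ([w].flatMap (fun w => w.toList.map String.singleton))) = [] := by
        apply List.filter_eq_nil_iff.2
        intro y hy
        rw [this y hy]
        simp
      rw [hfil, List.append_nil]
    · rw [PySem.Set.add_of_not_mem (by rw [PySem.Set.mem_ofList _ _]; exact hw)]
      unfold pvCharStream at *
      rw [List.flatMap_append, List.flatMap_append, PySem.Set.ofList_append, PySem.Set.ofList_append, ih]

theorem pvIndicatorSum (k : List String) (a : String) (c : Int) (hn : k.Nodup) (ha : a ∈ k) :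
    (k.map (fun x => if x = a then c else 0)).sum = c := by
  induction k with
  | nil => cases ha
  | cons x k ih =>
    rcases List.mem_cons.1 ha with rfl | h
    · have : ∀ y ∈ k, (if y = a then c else (0:Int)) = 0 := by
        intro y hy
        have : y ≠ a := by rintro rfl; exact (List.nodup_cons.1 hn).1 hy
        simp [this]
      simp [List.map_congr_left this]
    · have hx : x ≠ a := by rintro rfl; exact (List.nodup_cons.1 hn).1 h
      simp [hx, ih (List.nodup_cons.1 hn).2 h]

theorem pvSumDedup (l : List String) (g : String → Int) :
    (l.map g).sum = ((PySem.Set.ofList l).map (fun w => (l.count w : Int) * g w)).sum := by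
  induction l using List.reverseRecOn with
  | nil => rfl
  | append_singleton l a ih =>
    rw [PySem.Set.ofList_append_singleton, List.map_append, List.sum_append]
    by_cases ha : a ∈ l
    · rw [PySem.Set.add_of_mem ((PySem.Set.mem_ofList _ _).2 ha)]
      have hcnt : ∀ w, ((l ++ [a]).count w : Int) = (l.count w : Int) + (if w = a then 1 else 0) := by
        intro w
        rw [List.count_append]
        by_cases h : w = a
        · simp [h]
        · have h' : ¬ a = w := fun hh => h hh.symm
          simp [h, h']
      have : ((PySem.Set.ofList l).map (fun w => ((l ++ [a]).count w : Int) * g w)).sum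
          = ((PySem.Set.ofList l).map (fun w => (l.count w : Int) * g w + (if w = a then g a else 0))).sum := by
        apply congrArg
        apply List.map_congr_left
        intro w _
        rw [hcnt w]
        by_cases h : w = a
        · simp [h]; ring
        · simp [h]
      rw [this, PySem.List.sum_map_add_int, ← ih,
        pvIndicatorSum _ a (g a) (PySem.Set.nodup_ofList _) ((PySem.Set.mem_ofList _ _).2 ha)]
      simp
    · rw [PySem.Set.add_of_not_mem (fun h => ha ((PySem.Set.mem_ofList _ _).1 h))]
      rw [List.map_append, List.sum_append]
      have h1 : ((PySem.Set.ofList l).map (fun w => (((l ++ [a]).count w : Int)) * g w)).sum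
          = ((PySem.Set.ofList l).map (fun w => ((l.count w : Int)) * g w)).sum := by
        apply congrArg; apply List.map_congr_left
        intro w hw
        have hne : ¬ a = w := by rintro rfl; exact ha ((PySem.Set.mem_ofList _ _).1 hw)
        have hc : (l ++ [a]).count w = l.count w := by
          rw [List.count_append]
          simp [hne]
        rw [hc]
      rw [h1, ← ih]
      simp [List.count_append, List.count_eq_zero_of_not_mem ha]

-- inner char loop of A rewritten to the weighted step with weight 1
theorem pvInnerA (d : PySem.Dict String Int) (w : String) :
    w.toList.foldl (fun d c =>
       if d.contains (String.singleton c) then d.modify (String.singleton c) 0 (· + 1)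
       else d.insert (String.singleton c) 1) d = pvPairStep d (w, 1) := by
  exact pvFoldlExt _ _ _ _ (fun d c => pvBumpEq d (String.singleton c))

theorem pvCharDictsEq (words : List String) :
    words.foldl (fun d w =>
      w.toList.foldl (fun d c =>
        if d.contains (String.singleton c) then d.modify (String.singleton c) 0 (· + 1)
        else d.insert (String.singleton c) 1) d) PySem.Dict.empty
    = (PySem.Dict.counter words).items.foldl pvPairStep PySem.Dict.empty := by
  have hA : words.foldl (fun d w =>
      w.toList.foldl (fun d c =>
        if d.contains (String.singleton c) then d.modify (String.singleton c) 0 (· + 1)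
        else d.insert (String.singleton c) 1) d) PySem.Dict.empty
      = (words.map (fun w => (w, (1:Int)))).foldl pvPairStep PySem.Dict.empty := by
    rw [List.foldl_map]
    exact pvFoldlExt _ _ _ _ (fun d w => pvInnerA d w)
  rw [hA, PySem.Dict.items_counter]
  set LA := words.map (fun w => (w, (1:Int))) with hLA
  set LB := (PySem.Set.ofList words).map (fun k => (k, (words.count k : Int))) with hLB
  have hnodupA : (LA.foldl pvPairStep PySem.Dict.empty).keys.Nodup := by
    apply pvPairFoldNodup; simp
  have hnodupB : (LB.foldl pvPairStep PySem.Dict.empty).keys.Nodup := by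
    apply pvPairFoldNodup; simp
  have hkeysA : (LA.foldl pvPairStep PySem.Dict.empty).keys = PySem.Set.ofList (pvCharStream words) := by
    rw [pvPairFoldKeys]
    simp only [PySem.Dict.keys_empty, PySem.Set.update_nil_left, hLA, List.flatMap_map]
    rfl
  have hkeysB : (LB.foldl pvPairStep PySem.Dict.empty).keys
      = PySem.Set.ofList (pvCharStream (PySem.Set.ofList words)) := by
    rw [pvPairFoldKeys]
    simp only [PySem.Dict.keys_empty, PySem.Set.update_nil_left, hLB, List.flatMap_map]
    rfl
  have hgetD : ∀ s, (LA.foldl pvPairStep PySem.Dict.empty).getD s 0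
      = (LB.foldl pvPairStep PySem.Dict.empty).getD s 0 := by
    intro s
    rw [pvPairFoldGetD, pvPairFoldGetD]
    simp only [PySem.Dict.getD_empty, hLA, hLB, List.map_map, Function.comp_def, one_mul]
    rw [pvSumDedup words (fun w => ((w.toList.map String.singleton).count s : Int))]
  apply PySem.Dict.ext
  rw [PySem.Dict.items_eq_map_keys _ hnodupA (0:Int), PySem.Dict.items_eq_map_keys _ hnodupB (0:Int),
    hkeysA, hkeysB, ← pvKeysAgree]
  apply List.map_congr_left
  intro k _
  rw [hgetD k]

-- ===== VERDICT (by name: the statement is the Claim_ definition above) =====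
theorem create_histograms_spec : Claim_equal_create_histograms := by
  intro words _
  unfold Spec_create_histograms create_histograms create_histograms_alt
  have hsplit := PySem.List.foldl_prod_mk
    (fun (d : PySem.Dict String Int) word => if d.contains word then d.modify word 0 (· + 1) else d.insert word 1)
    (fun (d : PySem.Dict String Int) word => word.toList.foldl (fun d c =>
        if d.contains (String.singleton c) then d.modify (String.singleton c) 0 (· + 1)
        else d.insert (String.singleton c) 1) d)
    words PySem.Dict.empty PySem.Dict.empty
  beta_reduce at hsplit
  rw [hsplit]
  have hw : words.foldl (fun (d : PySem.Dict String Int) word => if d.contains word then d.modify word 0 (· + 1) else d.insert word 1) PySem.Dict.empty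
      = words.foldl (fun d word => d.insert word (d.getD word 0 + 1)) PySem.Dict.empty :=
    pvFoldlExt _ _ _ _ (fun d w => pvBumpEq d w)
  have hc := pvCharDictsEq words
  dsimp only
  rw [hw, hc]
  rfl
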